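-- pv_equiv track=rewrite | github.com/sergey-frd/cds_rus_py | de_rub_dollar_02.py | to_digit
-- ===== SOURCE A (Python) =====
-- def to_digit(input_str):
--
--     result =''
--     for p in input_str:
--         if '[' == p:
--             break
--
--         elif '.' == p:
--             result += p
--             continue
--         else:
--             if p.isdigit():
--                 result += p
--
--     return result
-- ===== SOURCE B (Python) =====
-- def to_digit(input_str):
--     prefix = input_str.split('[', 1)[0]
--     unwanted = {c for c in prefix if not (c.isdigit() or c == '.')}
--     return prefix.translate({ord(c): None for c in unwanted})
-- ===== Notes on version B (the rewrite author's own statement) =====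
-- stated objective: alternative
-- what changed: Replaces A's fused per-character loop with break/continue and string concatenation by a staged pipeline: truncate at the first left-bracket via split, build the set of unwanted characters of that prefix, and delete them with a str.translate deletion table.
import Mathlib
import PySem

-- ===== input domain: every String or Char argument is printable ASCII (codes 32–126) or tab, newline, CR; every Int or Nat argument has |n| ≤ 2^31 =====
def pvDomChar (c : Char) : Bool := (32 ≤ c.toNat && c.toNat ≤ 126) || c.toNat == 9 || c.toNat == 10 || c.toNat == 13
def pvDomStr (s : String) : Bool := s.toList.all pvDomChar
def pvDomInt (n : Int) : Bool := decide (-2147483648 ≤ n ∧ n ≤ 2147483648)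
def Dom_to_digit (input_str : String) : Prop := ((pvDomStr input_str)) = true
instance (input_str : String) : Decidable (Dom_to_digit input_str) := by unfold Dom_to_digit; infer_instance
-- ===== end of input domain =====

-- B replaces A's fused scan (break on '[', append digits/'.') by: truncate at '[',
-- build the SET of unwanted characters of the prefix, then delete them with a
-- translation table (str.translate); objective: alternative (set/table-based deletion).
-- ===== PORT A =====
def to_digit_go (result : List Char) : List Char → List Char
  | [] => result
  | p :: rest =>
    if '[' = p then result
    else if '.' = p then to_digit_go (result ++ [p]) rest
    else if PySem.Chars.isdigit p then to_digit_go (result ++ [p]) rest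
    else to_digit_go result rest

def to_digit (input_str : String) : String :=
  String.ofList (to_digit_go [] input_str.toList)

-- ===== PORT B =====
def to_digit_alt (input_str : String) : String :=
  let pre := input_str.toList.takeWhile (fun c => c ≠ '[')  -- input_str.split('[', 1)[0]
  -- unwanted = {c for c in prefix if not (c.isdigit() or c == '.')}
  let unwanted : PySem.Set Char :=
    PySem.Set.ofList (pre.filter (fun c => !(PySem.Chars.isdigit c || c == '.')))
  -- prefix.translate({ord(c): None for c in unwanted}) deletes exactly the chars in unwanted
  String.ofList (pre.filter (fun c => !(PySem.Set.contains unwanted c)))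

-- ===== PRECONDITION & SPEC =====
def Spec_to_digit (input_str : String) (out : String) : Prop := out = to_digit_alt input_str
instance (input_str : String) (out : String) : Decidable (Spec_to_digit input_str out) := by unfold Spec_to_digit; infer_instance

-- ===== CLAIM (what is proved, stated in full; the proofs are below) =====
def Claim_equal_to_digit : Prop := ∀ (input_str : String), Dom_to_digit input_str → Spec_to_digit input_str (to_digit input_str)

-- ===== LEMMAS AND PROOFS =====
lemma to_digit_go_eq (l : List Char) (acc : List Char) :
    to_digit_go acc l =
      acc ++ (l.takeWhile (fun c => c ≠ '[')).filter
        (fun c => PySem.Chars.isdigit c || c == '.') := by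
  induction l generalizing acc with
  | nil => simp [to_digit_go]
  | cons p rest ih =>
    by_cases h : p = '['
    · subst h; simp [to_digit_go, List.takeWhile]
    · have h' : ¬ ('[' = p) := fun e => h e.symm
      by_cases hd : p = '.'
      · subst hd
        simp [to_digit_go, List.takeWhile, ih]
      · have hd' : ¬ ('.' = p) := fun e => hd e.symm
        by_cases hq : PySem.Chars.isdigit p
        · simp [to_digit_go, h', hd', hq, List.takeWhile, h, ih]
        · simp [to_digit_go, h', hd', hq, List.takeWhile, h, hd, ih]

-- deleting the prefix's unwanted characters is filtering by the keep predicate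
lemma alt_filter_eq (pre : List Char) :
    pre.filter (fun c => !(PySem.Set.contains
        (PySem.Set.ofList (pre.filter (fun c => !(PySem.Chars.isdigit c || c == '.')))) c))
      = pre.filter (fun c => PySem.Chars.isdigit c || c == '.') := by
  apply List.filter_congr
  intro c hc
  simp [pysem, List.mem_filter, hc]
  by_cases hd : PySem.Chars.isdigit c <;> by_cases he : c = '.' <;> simp [hd, he]

-- ===== VERDICT (by name: the statement is the Claim_ definition above) =====
theorem to_digit_spec : Claim_equal_to_digit := by
  intro s _
  unfold Spec_to_digit to_digit to_digit_alt
  simp only [to_digit_go_eq, List.nil_append, alt_filter_eq]
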